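-- pv_equiv track=rewrite | github.com/johnwsampson/single-file-bench | scripts/sft_track.py | _generate_timeline_mermaid
-- ===== SOURCE A (Python) =====
-- def _generate_timeline_mermaid(tasks: list[dict]) -> str:
--     """Generate Mermaid timeline grouped by date."""
--     lines = ["timeline", "    title Task Timeline"]
--     by_date: dict[str, list[dict]] = {}
--     for t in tasks:
--         created = t.get("created", "")
--         if created:
--             date = created[:10]
--             by_date.setdefault(date, []).append(t)
--
--     for date in sorted(by_date.keys())[-14:]:
--         names = [t["content"][:25].replace(":", "-") for t in by_date[date]]
--         lines.append(f"    {date} : " + " : ".join(names))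
--     return "\n".join(lines)
-- ===== SOURCE B (Python) =====
-- def _generate_timeline_mermaid(tasks: list[dict]) -> str:
--     """Generate Mermaid timeline grouped by date."""
--     dates = sorted({t["created"][:10] for t in tasks if t.get("created", "")})[-14:]
--     return "\n".join(
--         ["timeline", "    title Task Timeline"]
--         + [
--             "    " + d + " : " + " : ".join(
--                 t["content"][:25].replace(":", "-")
--                 for t in tasks
--                 if t.get("created", "")[:10] == d
--             )
--             for d in dates
--         ]
--     )
-- ===== Notes on version B (the rewrite author's own statement) =====
-- stated objective: alternative
-- what changed: A accumulates a dict date->tasks in one pass and then sorts its keys; B first computes the sorted distinct date keys and then re-scans the task list once per emitted date, with no bucket accumulator.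
-- outside the precondition, e.g. on _generate_timeline_mermaid([{'created': '2024-01-02'}]): A raises KeyError, B raises KeyError
import Mathlib
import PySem

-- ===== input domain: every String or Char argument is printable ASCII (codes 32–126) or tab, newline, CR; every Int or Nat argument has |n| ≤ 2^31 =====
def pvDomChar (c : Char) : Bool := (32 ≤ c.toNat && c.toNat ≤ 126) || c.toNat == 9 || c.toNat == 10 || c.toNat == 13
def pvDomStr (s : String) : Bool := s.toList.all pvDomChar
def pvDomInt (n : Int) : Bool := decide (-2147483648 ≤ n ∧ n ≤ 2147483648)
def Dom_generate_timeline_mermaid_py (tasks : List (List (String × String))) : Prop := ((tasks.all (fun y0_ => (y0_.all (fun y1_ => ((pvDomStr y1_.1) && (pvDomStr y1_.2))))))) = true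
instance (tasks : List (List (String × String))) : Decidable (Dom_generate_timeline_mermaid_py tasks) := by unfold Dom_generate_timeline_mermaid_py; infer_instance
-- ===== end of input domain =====

-- B replaces A's dict-bucket accumulator (date → tasks, then sorted keys) by computing the sorted
-- distinct dates first and re-scanning the task list once per date; same output, no speed claim.

-- ===== PORT A =====
-- A's accumulation loop 'for t in tasks: … by_date.setdefault(date, []).append(t)' as a named helper
def pvBuild (tasks : List (List (String × String))) : PySem.Dict String (List (List (String × String))) :=
  tasks.foldl (fun d t =>
    let created := (PySem.Dict.mk t).getD "created" ""
    if created ≠ "" then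
      d.modify (PySem.Str.slice created none (some 10)) [] (fun l => l ++ [t])
    else d) PySem.Dict.empty

-- t["content"] is ported as getD … "" ; Pre_ below guarantees the key is present (Python raises KeyError otherwise).
def generate_timeline_mermaid_py (tasks : List (List (String × String))) : String :=
  let lines : List String := ["timeline", "    title Task Timeline"]
  let byDate := pvBuild tasks
  let lines := lines ++
    (PySem.List.slice (PySem.List.sorted byDate.keys (fun x => x) false) (some (-14)) none).map
      (fun date =>
        let names := (byDate.getD date []).map (fun t =>
          PySem.Str.replace (PySem.Str.slice ((PySem.Dict.mk t).getD "content" "") none (some 25)) ":" "-")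
        "    " ++ date ++ " : " ++ PySem.Str.join " : " names)
  PySem.Str.join "\n" lines

-- ===== PORT B =====
-- B's date key t.get("created", "")[:10]
def pvDateOf (t : List (String × String)) : String :=
  PySem.Str.slice ((PySem.Dict.mk t).getD "created" "") none (some 10)

-- B's set comprehension {t["created"][:10] for t in tasks if t.get("created", "")} before dedup
def pvDates (tasks : List (List (String × String))) : List String :=
  tasks.filterMap (fun t =>
    let c := (PySem.Dict.mk t).getD "created" ""
    if c ≠ "" then some (PySem.Str.slice c none (some 10)) else none)

def generate_timeline_mermaid_py_alt (tasks : List (List (String × String))) : String :=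
  let dates := PySem.List.slice
    (PySem.List.sorted (PySem.Set.ofList (pvDates tasks)) (fun x => x) false) (some (-14)) none
  PySem.Str.join "\n"
    (["timeline", "    title Task Timeline"] ++
      dates.map (fun d =>
        "    " ++ d ++ " : " ++ PySem.Str.join " : "
          ((tasks.filter (fun t => pvDateOf t == d)).map
            (fun t =>
              PySem.Str.replace (PySem.Str.slice ((PySem.Dict.mk t).getD "content" "") none (some 25)) ":" "-"))))

-- ===== PRECONDITION & SPEC =====
-- Pre_ excludes tasks with a non-empty "created" but no "content" key: there Python A raises KeyError
-- (t["content"]), and Python B raises there too.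
def Pre_generate_timeline_mermaid_py (tasks : List (List (String × String))) : Prop :=
  ∀ t ∈ tasks, (PySem.Dict.mk t).getD "created" "" ≠ "" → (PySem.Dict.mk t).contains "content" = true
instance (tasks : List (List (String × String))) : Decidable (Pre_generate_timeline_mermaid_py tasks) := by
  unfold Pre_generate_timeline_mermaid_py; infer_instance
def pvWitness_generate_timeline_mermaid_py : (List (List (String × String))) :=
  [[("created", "2024-01-02"), ("content", "write: docs")], [("content", "no date")]]

def Spec_generate_timeline_mermaid_py (tasks : List (List (String × String))) (out : String) : Prop := out = generate_timeline_mermaid_py_alt tasks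
instance (tasks : List (List (String × String))) (out : String) : Decidable (Spec_generate_timeline_mermaid_py tasks out) := by unfold Spec_generate_timeline_mermaid_py; infer_instance

-- ===== CLAIM (what is proved, stated in full; the proofs are below) =====
def Claim_equal_generate_timeline_mermaid_py : Prop := ∀ (tasks : List (List (String × String))), Dom_generate_timeline_mermaid_py tasks → Pre_generate_timeline_mermaid_py tasks → Spec_generate_timeline_mermaid_py tasks (generate_timeline_mermaid_py tasks)

-- ===== LEMMAS AND PROOFS =====

-- a slice s[:10] of a non-empty string is non-empty, so every date key is ≠ ""
theorem pvSlice_ne_empty (s : String) (h : s ≠ "") : PySem.Str.slice s none (some 10) ≠ "" := by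
  intro he
  apply h
  have h2 := congrArg String.toList he
  simp only [PySem.Str.toList_slice, PySem.Chars.slice] at h2
  rw [show ((10:Int) = ((10:Nat):Int)) from rfl, PySem.List.slice_to_natCast] at h2
  simp only [String.toList_empty, List.take_eq_nil_iff] at h2
  rcases h2 with h3 | h3
  · simp at h3
  · exact String.ext (by simpa using h3)

theorem pvDates_ne_empty (tasks : List (List (String × String))) (d : String)
    (h : d ∈ pvDates tasks) : d ≠ "" := by
  simp only [pvDates, List.mem_filterMap] at h
  obtain ⟨t, _, ht⟩ := h
  by_cases hc : (PySem.Dict.mk t).getD "created" "" = ""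
  · simp [hc] at ht
  · simp only [hc, ne_eq, not_false_eq_true, if_pos, Option.some.injEq] at ht
    exact ht ▸ pvSlice_ne_empty _ hc

-- A's dict after the loop: its keys are the distinct date keys in first-occurrence order,
-- and each bucket is the subsequence of tasks with that date key.
theorem pvBuild_spec (tasks : List (List (String × String))) :
    (pvBuild tasks).keys = PySem.Set.ofList (pvDates tasks) ∧
    ∀ d : String, d ≠ "" →
      (pvBuild tasks).getD d [] = tasks.filter (fun t => pvDateOf t == d) := by
  induction tasks using List.reverseRecOn with
  | nil => exact ⟨rfl, fun d _ => rfl⟩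
  | append_singleton ts t ih =>
    obtain ⟨ih1, ih2⟩ := ih
    by_cases hc : (PySem.Dict.mk t).getD "created" "" = ""
    · have hb : pvBuild (ts ++ [t]) = pvBuild ts := by
        simp [pvBuild, List.foldl_append, hc]
      have hd : pvDates (ts ++ [t]) = pvDates ts := by simp [pvDates, hc]
      have hdt : pvDateOf t = "" := by simp [pvDateOf, hc]; rfl
      refine ⟨by rw [hb, hd, ih1], ?_⟩
      intro d hne
      rw [hb, ih2 d hne, List.filter_append]
      simp [hdt, (by simpa using Ne.symm hne : ¬ (("" : String) == d) = true)]
    · have hb : pvBuild (ts ++ [t]) = (pvBuild ts).modify (pvDateOf t) [] (fun l => l ++ [t]) := by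
        simp [pvBuild, pvDateOf, List.foldl_append, hc]
      have hd : pvDates (ts ++ [t]) = pvDates ts ++ [pvDateOf t] := by
        simp [pvDates, pvDateOf, hc]
      refine ⟨?_, ?_⟩
      · rw [hb, hd, PySem.Dict.keys_modify,
          (by simp [pysem] :
            PySem.Set.ofList (pvDates ts ++ [pvDateOf t])
              = PySem.Set.add (PySem.Set.ofList (pvDates ts)) (pvDateOf t))]
        by_cases hk : (pvBuild ts).contains (pvDateOf t) = true
        · have hmem : pvDateOf t ∈ PySem.Set.ofList (pvDates ts) := by
            rw [← ih1, ← PySem.Dict.contains_iff_mem_keys]; exact hk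
          rw [PySem.Dict.keys_insert_of_contains _ _ hk, ih1]
          simp [pysem, hmem]
        · have hmem : pvDateOf t ∉ PySem.Set.ofList (pvDates ts) := by
            rw [← ih1, ← PySem.Dict.contains_iff_mem_keys]; simpa using hk
          rw [PySem.Dict.keys_insert_of_not_contains _ _ (by simpa using hk), ih1]
          simp [pysem, hmem]
      · intro d hne
        rw [hb, PySem.Dict.getD_modify, List.filter_append, ih2 d hne]
        by_cases hdd : d = pvDateOf t
        · simp only [if_pos hdd, ih2 (pvDateOf t) (hdd ▸ hne)]
          simp [hdd]
        · simp [if_neg hdd, (by simpa using fun h => hdd h.symm : ¬ (pvDateOf t == d) = true)]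

-- ===== VERDICT (by name: the statement is the Claim_ definition above) =====
theorem generate_timeline_mermaid_py_spec : Claim_equal_generate_timeline_mermaid_py := by
  intro tasks _ _
  unfold Spec_generate_timeline_mermaid_py
  obtain ⟨h1, h2⟩ := pvBuild_spec tasks
  simp only [generate_timeline_mermaid_py, generate_timeline_mermaid_py_alt, h1]
  refine congrArg (PySem.Str.join "\n") (congrArg _ (List.map_congr_left ?_))
  intro d hdm
  have hd : d ∈ pvDates tasks := by
    have hm := PySem.List.mem_of_mem_slice _ _ _ hdm
    rw [PySem.List.mem_sorted] at hm
    exact (PySem.Set.mem_ofList _ _).mp hm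
  rw [h2 d (pvDates_ne_empty tasks d hd)]
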